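-- pv_equiv track=rewrite | github.com/geomsb/KalHomework | Homework 3/3_5.py | sumOfDoubleEvenPlace
-- ===== SOURCE A (Python) =====
-- def getDigit (number):
--     modulo = number % 10
--     div = number // 10
--     number = div
--     final = modulo*2
--     modulo_doub = final % 10
--     div_doub = final // 10
--     if final > 9:
--         final = modulo_doub + div_doub
--     else:
--         final = modulo*2
--     return (final)
--
-- def sumOfDoubleEvenPlace (number):
--     sum_dig = 0
--     counter = 0
--     while (number)>0:
--         counter = counter + 1
--         if counter % 2 == 0:
--             sum_dig += getDigit (number)
--         div = number // 10
--         number = div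
--
--     return (sum_dig)
-- ===== SOURCE B (Python) =====
-- def sumOfDoubleEvenPlace(number):
--     total = 0
--     n = number // 10
--     while n > 0:
--         d = 2 * (n % 10)
--         total += d if d <= 9 else d - 9
--         n //= 100
--     return total
-- ===== Notes on version B (the rewrite author's own statement) =====
-- stated objective: simpler
-- what changed: B drops A's counter/parity bookkeeping and the getDigit divmod helper: it starts from the number with its last digit dropped and strides two digits at a time, so it visits exactly the even-place digits, collapsing each doubled digit arithmetically (subtracting nine when the double exceeds one digit).
import Mathlib
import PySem

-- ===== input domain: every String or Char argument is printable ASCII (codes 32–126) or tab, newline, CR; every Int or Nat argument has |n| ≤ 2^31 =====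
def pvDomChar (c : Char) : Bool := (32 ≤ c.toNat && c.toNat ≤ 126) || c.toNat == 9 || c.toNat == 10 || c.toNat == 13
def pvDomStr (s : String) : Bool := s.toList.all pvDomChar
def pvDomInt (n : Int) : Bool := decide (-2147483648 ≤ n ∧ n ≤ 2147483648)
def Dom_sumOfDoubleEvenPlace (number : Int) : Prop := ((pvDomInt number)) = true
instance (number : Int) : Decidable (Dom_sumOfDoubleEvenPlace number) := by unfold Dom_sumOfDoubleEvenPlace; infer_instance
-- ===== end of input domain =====

-- B replaces A's counter/parity loop and getDigit helper by a single //100-stride loop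
-- over the even-place digits with an arithmetic digit collapse (objective: simpler).


-- ===== PORT A =====
def getDigit (number : Int) : Int :=
  let modulo := PySem.Int.mod number 10
  let div := PySem.Int.floordiv number 10
  let _number := div
  let final := modulo * 2
  let modulo_doub := PySem.Int.mod final 10
  let div_doub := PySem.Int.floordiv final 10
  if final > 9 then modulo_doub + div_doub else modulo * 2

def sumLoopA (number sum_dig counter : Int) : Int :=
  if h : number > 0 then
    let counter' := counter + 1
    let sum' := if PySem.Int.mod counter' 2 = 0 then sum_dig + getDigit number else sum_dig
    sumLoopA (PySem.Int.floordiv number 10) sum' counter'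
  else sum_dig
termination_by number.toNat
decreasing_by
  rw [PySem.Int.floordiv_eq_ediv_of_pos (by norm_num)]
  omega

def sumOfDoubleEvenPlace (number : Int) : Int := sumLoopA number 0 0

-- ===== PORT B =====
def sumLoopB (n total : Int) : Int :=
  if h : n > 0 then
    let d := 2 * PySem.Int.mod n 10
    sumLoopB (PySem.Int.floordiv n 100) (total + if d ≤ 9 then d else d - 9)
  else total
termination_by n.toNat
decreasing_by
  rw [PySem.Int.floordiv_eq_ediv_of_pos (by norm_num)]
  omega

def sumOfDoubleEvenPlace_alt (number : Int) : Int :=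
  sumLoopB (PySem.Int.floordiv number 10) 0

-- ===== PRECONDITION & SPEC =====
def Spec_sumOfDoubleEvenPlace (number : Int) (out : Int) : Prop := out = sumOfDoubleEvenPlace_alt number
instance (number : Int) (out : Int) : Decidable (Spec_sumOfDoubleEvenPlace number out) := by unfold Spec_sumOfDoubleEvenPlace; infer_instance

-- ===== CLAIM (what is proved, stated in full; the proofs are below) =====
def Claim_equal_sumOfDoubleEvenPlace : Prop := ∀ (number : Int), Dom_sumOfDoubleEvenPlace number → Spec_sumOfDoubleEvenPlace number (sumOfDoubleEvenPlace number)

-- ===== LEMMAS AND PROOFS =====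

-- A's getDigit equals B's arithmetic collapse of the doubled last digit.
lemma getDigit_eq (m : Int) :
    getDigit m = (if 2 * PySem.Int.mod m 10 ≤ 9 then 2 * PySem.Int.mod m 10
                  else 2 * PySem.Int.mod m 10 - 9) := by
  have h10 : (0:Int) < 10 := by norm_num
  simp only [getDigit, PySem.Int.mod_eq_emod_of_pos h10, PySem.Int.floordiv_eq_ediv_of_pos h10]
  split_ifs <;> omega

-- Two steps of A's loop (starting at an even counter) match one step of B's loop on number // 10.
lemma loop_eq (k : Nat) : ∀ (n s c : Int), n.toNat ≤ k → c % 2 = 0 →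
    sumLoopA n s c = sumLoopB (PySem.Int.floordiv n 10) s := by
  induction k with
  | zero =>
    intro n s c hk _
    rw [sumLoopA, sumLoopB, dif_neg (by omega), dif_neg]
    rw [PySem.Int.floordiv_eq_ediv_of_pos (by norm_num)]
    omega
  | succ k ih =>
    intro n s c hk hc
    by_cases hn : n > 0
    · rw [sumLoopA, dif_pos hn]
      simp only []
      have hpar1 : PySem.Int.mod (c + 1) 2 = 1 := by
        rw [PySem.Int.mod_eq_emod_of_pos (by norm_num)]; omega
      rw [hpar1]
      simp only [one_ne_zero, if_false]
      set m := PySem.Int.floordiv n 10 with hm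
      have hmval : m = n / 10 := by
        rw [hm, PySem.Int.floordiv_eq_ediv_of_pos (by norm_num)]
      by_cases hm0 : m > 0
      · -- second step of A: counter c+2 is even, digit of m is added
        rw [sumLoopA, dif_pos hm0]
        simp only []
        have hpar2 : PySem.Int.mod (c + 1 + 1) 2 = 0 := by
          rw [PySem.Int.mod_eq_emod_of_pos (by norm_num)]; omega
        rw [hpar2]
        rw [sumLoopB, dif_pos hm0]
        simp only []
        have hbound : (PySem.Int.floordiv m 10).toNat ≤ k := by
          rw [PySem.Int.floordiv_eq_ediv_of_pos (by norm_num)]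
          omega
        have hdd : PySem.Int.floordiv (PySem.Int.floordiv m 10) 10 = PySem.Int.floordiv m 100 := by
          rw [PySem.Int.floordiv_eq_ediv_of_pos (by norm_num : (0:Int) < 10),
              PySem.Int.floordiv_eq_ediv_of_pos (by norm_num : (0:Int) < 10),
              PySem.Int.floordiv_eq_ediv_of_pos (by norm_num : (0:Int) < 100),
              Int.ediv_ediv_of_nonneg (by omega)]
          norm_num
        rw [ih (PySem.Int.floordiv m 10) _ (c + 1 + 1) hbound (by omega), hdd, getDigit_eq]
        simp
      · -- m ≤ 0 : both loops stop
        rw [sumLoopA, dif_neg hm0, sumLoopB, dif_neg hm0]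
    · rw [sumLoopA, dif_neg hn, sumLoopB, dif_neg]
      rw [PySem.Int.floordiv_eq_ediv_of_pos (by norm_num)]
      omega

-- ===== VERDICT (by name: the statement is the Claim_ definition above) =====
theorem sumOfDoubleEvenPlace_spec : Claim_equal_sumOfDoubleEvenPlace := by
  intro n _
  unfold Spec_sumOfDoubleEvenPlace sumOfDoubleEvenPlace sumOfDoubleEvenPlace_alt
  exact loop_eq n.toNat n 0 0 le_rfl rfl
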